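-- pv_equiv track=rewrite | github.com/yweiss0/Hadar_Fisher_webapp | new_app_chatbot.py | is_graph_related
-- ===== SOURCE A (Python) =====
-- def is_graph_related(query: str) -> bool:
--     """
--     Check if the query is related to a graph using enhanced keyword matching.
--     """
--     graph_keywords = {
--         "graph",
--         "plot",
--         "figure",
--         "chart",
--         "diagram",
--         "line",
--         "bar",
--         "scatter",
--         "table",
--         "violin",
--         "box",
--         "trend",
--         "curve",
--         "axis",
--         "data point",
--         "visualization",
--         "r2",
--         "model performance",
--         "distribution",
--     }
--     query_lower = query.lower().strip()
--     words = query_lower.split()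
--
--     if any(keyword in query_lower for keyword in graph_keywords):
--         return True
--
--     multi_word_phrases = {
--         "bar chart",
--         "line graph",
--         "scatter plot",
--         "box plot",
--         "data visualization",
--         "figure showing",
--         "chart showing",
--     }
--     for phrase in multi_word_phrases:
--         if phrase in query_lower:
--             return True
--
--     return False
-- ===== SOURCE B (Python) =====
-- _GRAPH_KEYWORDS = (
--     "graph", "plot", "figure", "chart", "diagram", "line", "bar", "scatter",
--     "table", "violin", "box", "trend", "curve", "axis", "data point",
--     "visualization", "r2", "model performance", "distribution",
-- )
--
--
-- def is_graph_related(query: str) -> bool: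
--     # One left-to-right scan over the query: at each position, test whether
--     # any keyword starts there.  The multi-word phrases of the original are
--     # omitted: each of them contains one of the keywords, so they add nothing.
--     q = query.lower().strip()
--     for i in range(len(q) + 1):
--         for k in _GRAPH_KEYWORDS:
--             if q.startswith(k, i):
--                 return True
--     return False
-- ===== Notes on version B (the rewrite author's own statement) =====
-- stated objective: alternative
-- what changed: Replaces the two per-keyword substring-containment loops (keywords, then redundant multi-word phrases) by a single left-to-right scan of the query that tests at each position whether any keyword starts there; the phrase set is dropped since every phrase contains a keyword.
import Mathlib
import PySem

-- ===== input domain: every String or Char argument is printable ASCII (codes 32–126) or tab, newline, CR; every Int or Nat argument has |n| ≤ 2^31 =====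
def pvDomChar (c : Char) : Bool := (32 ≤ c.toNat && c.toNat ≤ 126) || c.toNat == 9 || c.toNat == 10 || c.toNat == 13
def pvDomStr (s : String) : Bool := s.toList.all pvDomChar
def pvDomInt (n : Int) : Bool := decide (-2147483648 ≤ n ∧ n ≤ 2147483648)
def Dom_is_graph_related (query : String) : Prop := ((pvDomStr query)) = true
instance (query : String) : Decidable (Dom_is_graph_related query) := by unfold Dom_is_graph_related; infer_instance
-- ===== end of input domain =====

-- B replaces A's two per-keyword containment loops by a single left-to-right scan of the
-- query that tests at each position whether any keyword starts there (phrases dropped as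
-- subsumed); objective: alternative (same asymptotic cost, different traversal).


-- ===== PORT A =====
def graphKeywordsA : List String :=
  ["graph", "plot", "figure", "chart", "diagram", "line", "bar", "scatter",
   "table", "violin", "box", "trend", "curve", "axis", "data point",
   "visualization", "r2", "model performance", "distribution"]

def multiWordPhrasesA : List String :=
  ["bar chart", "line graph", "scatter plot", "box plot", "data visualization",
   "figure showing", "chart showing"]

def is_graph_related (query : String) : Bool :=
  let queryLower := PySem.Str.strip (PySem.Str.lower query)
  let _words := PySem.Str.split₀ queryLower   -- Python computes `words`; it is never used
  if graphKeywordsA.any (fun k => PySem.Str.isIn k queryLower) then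
    true
  else
    multiWordPhrasesA.any (fun p => PySem.Str.isIn p queryLower)

-- ===== PORT B =====
def graphKeywordsB : List String :=
  ["graph", "plot", "figure", "chart", "diagram", "line", "bar", "scatter",
   "table", "violin", "box", "trend", "curve", "axis", "data point",
   "visualization", "r2", "model performance", "distribution"]

-- one scan over the characters: at each position, does some keyword start here?
def scanB : List Char → Bool
  | [] => graphKeywordsB.any (fun k => PySem.Chars.startswith [] k.toList)
  | c :: t =>
      graphKeywordsB.any (fun k => PySem.Chars.startswith (c :: t) k.toList) || scanB t

def is_graph_related_alt (query : String) : Bool :=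
  scanB (PySem.Chars.strip (PySem.Chars.lower query.toList))

-- ===== PRECONDITION & SPEC =====
def Spec_is_graph_related (query : String) (out : Bool) : Prop := out = is_graph_related_alt query
instance (query : String) (out : Bool) : Decidable (Spec_is_graph_related query out) := by unfold Spec_is_graph_related; infer_instance

-- ===== CLAIM (what is proved, stated in full; the proofs are below) =====
def Claim_equal_is_graph_related : Prop := ∀ (query : String), Dom_is_graph_related query → Spec_is_graph_related query (is_graph_related query)

-- ===== LEMMAS AND PROOFS =====

-- B's scan finds exactly the suffix positions where a keyword is a prefix, i.e. keyword infixes.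
theorem scanB_eq_true_iff (cs : List Char) :
    scanB cs = true ↔ ∃ k ∈ graphKeywordsB, k.toList <:+: cs := by
  induction cs with
  | nil =>
      simp only [scanB, List.any_eq_true, PySem.Chars.startswith_iff]
      simp [List.prefix_nil, List.infix_nil]
  | cons c t ih =>
      simp only [scanB, Bool.or_eq_true, List.any_eq_true, PySem.Chars.startswith_iff, ih,
        List.infix_cons_iff]
      constructor
      · rintro (⟨k, hk, hp⟩ | ⟨k, hk, hi⟩)
        · exact ⟨k, hk, Or.inl hp⟩
        · exact ⟨k, hk, Or.inr hi⟩
      · rintro ⟨k, hk, hp | hi⟩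
        · exact Or.inl ⟨k, hk, hp⟩
        · exact Or.inr ⟨k, hk, hi⟩

-- every multi-word phrase of A contains a keyword, so it adds no matches
theorem phrase_subsumed (p : String) (hp : p ∈ multiWordPhrasesA) (cs : List Char)
    (h : p.toList <:+: cs) : ∃ k ∈ graphKeywordsA, k.toList <:+: cs := by
  fin_cases hp
  · exact ⟨"bar", by decide, List.IsInfix.trans (by decide) h⟩
  · exact ⟨"line", by decide, List.IsInfix.trans (by decide) h⟩
  · exact ⟨"scatter", by decide, List.IsInfix.trans (by decide) h⟩
  · exact ⟨"box", by decide, List.IsInfix.trans (by decide) h⟩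
  · exact ⟨"visualization", by decide, List.IsInfix.trans (by decide) h⟩
  · exact ⟨"figure", by decide, List.IsInfix.trans (by decide) h⟩
  · exact ⟨"chart", by decide, List.IsInfix.trans (by decide) h⟩

-- A returns true exactly when some keyword is an infix of the lowered, stripped query.
theorem portA_eq_true_iff (q : String) :
    is_graph_related q = true ↔
      ∃ k ∈ graphKeywordsA, k.toList <:+: PySem.Chars.strip (PySem.Chars.lower q.toList) := by
  unfold is_graph_related
  simp only []
  have hql : (PySem.Str.strip (PySem.Str.lower q)).toList
      = PySem.Chars.strip (PySem.Chars.lower q.toList) := by simp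
  split_ifs with h
  · simp only [List.any_eq_true, PySem.Str.isIn_iff_infix, hql] at h
    simpa using h
  · simp only [List.any_eq_true, PySem.Str.isIn_iff_infix, hql] at h ⊢
    push Not at h
    constructor
    · rintro ⟨p, hp, hi⟩
      exact phrase_subsumed p hp _ hi
    · rintro ⟨k, hk, hi⟩
      exact absurd hi (h k hk)

-- ===== VERDICT (by name: the statement is the Claim_ definition above) =====
theorem is_graph_related_spec : Claim_equal_is_graph_related := by
  intro query _
  unfold Spec_is_graph_related is_graph_related_alt
  rw [Bool.eq_iff_iff, portA_eq_true_iff, scanB_eq_true_iff]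
  rfl
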